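-- pv_equiv track=rewrite | github.com/MarcaoPeixoto/cubbo-control-center | atrasos.py | count_atrasos_by_uf_and_transportadora
-- ===== SOURCE A (Python) =====
-- from collections import defaultdict
--
-- def count_atrasos_by_uf_and_transportadora(atrasos):
--     order_counts = defaultdict(lambda: defaultdict(int))
--
--     for atraso in atrasos:
--         uf = atraso['UF']
--         transportadora = atraso['transportadora']
--         order_counts[uf][transportadora] += 1
--
--     # Convert defaultdict to regular dict and sort UFs alphabetically
--     return {
--         uf: dict(carriers)
--         for uf, carriers in sorted(order_counts.items())
--     }
-- ===== SOURCE B (Python) =====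
-- def count_atrasos_by_uf_and_transportadora(atrasos):
--     # No incremental counting at all: extract the (UF, transportadora) pairs once,
--     # then for each sorted distinct UF build its carrier dict by scanning the pair
--     # list with list.count (duplicate carrier keys overwrite with the same count,
--     # so first-encounter inner order is preserved).
--     keys = [(a['UF'], a['transportadora']) for a in atrasos]
--     return {
--         uf: {t: keys.count((u, t)) for u, t in keys if u == uf}
--         for uf in sorted({u for u, _ in keys})
--     }
-- ===== Notes on version B (the rewrite author's own statement) =====
-- stated objective: alternative
-- what changed: Replaces the single-pass nested-defaultdict counter by a counting-free staged form: extract the (UF, transportadora) pairs, then for each sorted distinct UF build its carrier dict by comprehension, computing each count with list.count scans.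
-- outside the precondition, e.g. on count_atrasos_by_uf_and_transportadora([{'UF': 'SP'}]): A raises KeyError, B raises KeyError
import Mathlib
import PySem

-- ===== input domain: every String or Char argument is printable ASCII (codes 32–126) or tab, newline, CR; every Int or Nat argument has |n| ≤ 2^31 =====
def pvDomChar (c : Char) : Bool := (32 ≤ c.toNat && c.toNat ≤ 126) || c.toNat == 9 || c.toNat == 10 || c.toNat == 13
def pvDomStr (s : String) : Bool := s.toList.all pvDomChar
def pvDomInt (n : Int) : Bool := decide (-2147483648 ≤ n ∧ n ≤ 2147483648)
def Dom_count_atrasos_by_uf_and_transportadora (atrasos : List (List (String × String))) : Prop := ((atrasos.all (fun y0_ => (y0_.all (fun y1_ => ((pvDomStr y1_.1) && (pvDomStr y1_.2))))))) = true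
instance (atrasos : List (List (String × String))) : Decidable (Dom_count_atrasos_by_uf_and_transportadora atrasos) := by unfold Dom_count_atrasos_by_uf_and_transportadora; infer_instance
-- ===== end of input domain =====

-- B drops the incremental nested-defaultdict counter: it extracts the key pairs once and builds each sorted UF's carrier dict by comprehension with list.count scans (alternative algorithm, not faster).

-- ===== PORT A =====
-- nested-defaultdict counting; `atraso['UF']` is ported as getD with "" default — exact under Pre_, which excludes the KeyError inputs
def count_atrasos_by_uf_and_transportadora (atrasos : List (List (String × String))) : List (String × List (String × Int)) :=
  let order_counts : PySem.Dict String (PySem.Dict String Int) :=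
    atrasos.foldl (fun oc atraso =>
      let uf := (PySem.Dict.ofList atraso).getD "UF" ""
      let transportadora := (PySem.Dict.ofList atraso).getD "transportadora" ""
      oc.modify uf PySem.Dict.empty (fun inner => inner.modify transportadora 0 (· + 1)))
      PySem.Dict.empty
  (PySem.List.sorted order_counts.items (fun p => p.1) false).map (fun p => (p.1, p.2.items))

-- ===== PORT B =====
-- keys = list of (UF, transportadora) pairs; outer dict comprehension over sorted distinct UFs,
-- inner dict comprehension = fold of insert over the filtered pairs, value = keys.count((u, t))
def count_atrasos_by_uf_and_transportadora_alt (atrasos : List (List (String × String))) : List (String × List (String × Int)) :=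
  let keys : List (String × String) :=
    atrasos.map (fun a => ((PySem.Dict.ofList a).getD "UF" "", (PySem.Dict.ofList a).getD "transportadora" ""))
  (PySem.List.sorted (PySem.Set.ofList (keys.map (·.1))) (fun u => u) false).map
    (fun uf => (uf,
      ((keys.filter (fun p => p.1 == uf)).foldl
        (fun d p => d.insert p.2 ((keys.count (p.1, p.2) : Int))) PySem.Dict.empty).items))

-- ===== PRECONDITION & SPEC =====
-- Pre_ excludes exactly the inputs where some element lacks the 'UF' or 'transportadora' key, on which A raises KeyError.
def Pre_count_atrasos_by_uf_and_transportadora (atrasos : List (List (String × String))) : Prop :=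
  ∀ a ∈ atrasos, (PySem.Dict.ofList a).contains "UF" = true ∧ (PySem.Dict.ofList a).contains "transportadora" = true
instance (atrasos : List (List (String × String))) : Decidable (Pre_count_atrasos_by_uf_and_transportadora atrasos) := by unfold Pre_count_atrasos_by_uf_and_transportadora; infer_instance
def pvWitness_count_atrasos_by_uf_and_transportadora : (List (List (String × String))) :=
  [[("UF", "SP"), ("transportadora", "X")], [("UF", "RJ"), ("transportadora", "Y")], [("UF", "SP"), ("transportadora", "X")]]

def Spec_count_atrasos_by_uf_and_transportadora (atrasos : List (List (String × String))) (out : List (String × List (String × Int))) : Prop := out = count_atrasos_by_uf_and_transportadora_alt atrasos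
instance (atrasos : List (List (String × String))) (out : List (String × List (String × Int))) : Decidable (Spec_count_atrasos_by_uf_and_transportadora atrasos out) := by unfold Spec_count_atrasos_by_uf_and_transportadora; infer_instance

-- ===== CLAIM (what is proved, stated in full; the proofs are below) =====
def Claim_equal_count_atrasos_by_uf_and_transportadora : Prop := ∀ (atrasos : List (List (String × String))), Dom_count_atrasos_by_uf_and_transportadora atrasos → Pre_count_atrasos_by_uf_and_transportadora atrasos → Spec_count_atrasos_by_uf_and_transportadora atrasos (count_atrasos_by_uf_and_transportadora atrasos)

-- ===== LEMMAS AND PROOFS =====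

-- the (uf, transportadora) pair both programs extract from one element
def pvKey (a : List (String × String)) : String × String :=
  ((PySem.Dict.ofList a).getD "UF" "", (PySem.Dict.ofList a).getD "transportadora" "")

-- A's loop body on the extracted pairs
def pvStepA (oc : PySem.Dict String (PySem.Dict String Int)) (k : String × String) : PySem.Dict String (PySem.Dict String Int) :=
  oc.modify k.1 PySem.Dict.empty (fun inner => inner.modify k.2 0 (· + 1))

-- transportadoras of a given UF, in order
def pvTs (u : String) (pairs : List (String × String)) : List String :=
  (pairs.filter (fun p => p.1 == u)).map (·.2)

theorem pvGetD_foldA (pairs : List (String × String)) (oc : PySem.Dict String (PySem.Dict String Int)) (u : String) :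
    (pairs.foldl pvStepA oc).getD u PySem.Dict.empty
      = (pvTs u pairs).foldl (fun i t => i.modify t 0 (· + 1)) (oc.getD u PySem.Dict.empty) := by
  induction pairs generalizing oc with
  | nil => rfl
  | cons p rest ih =>
    simp only [List.foldl_cons, ih, pvTs, List.filter_cons]
    by_cases h : p.1 = u
    · simp [h, pvStepA]
    · simp [h, pvStepA, PySem.Dict.getD_modify, Ne.symm h]

theorem pvCount_ts (u t : String) (pairs : List (String × String)) :
    (pvTs u pairs).count t = pairs.count (u, t) := by
  induction pairs with
  | nil => rfl
  | cons p rest ih =>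
    by_cases h : p.1 = u
    · have hts : pvTs u (p :: rest) = p.2 :: pvTs u rest := by
        simp [pvTs, h]
      rw [hts, List.count_cons, List.count_cons, ih]
      have : (p == (u, t)) = (p.2 == t) := by
        cases p; simp_all [Prod.ext_iff]
      rw [this]
    · have hts : pvTs u (p :: rest) = pvTs u rest := by
        simp [pvTs, h]
      have hne : (p == (u, t)) = false := by
        cases p; simp_all [Prod.ext_iff]
      rw [hts, ih, List.count_cons, hne]
      simp

-- a fold of insert with a value depending only on the key: items = deduped keys paired with their value
theorem pvItems_foldl_insert_const {α : Type} [BEq α] [LawfulBEq α] (xs : List α) (c : α → Int) :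
    ((xs.foldl (fun d x => d.insert x (c x)) PySem.Dict.empty).items)
      = (PySem.Set.ofList xs).map (fun x => (x, c x)) := by
  induction xs using List.reverseRecOn with
  | nil => rfl
  | append_singleton xs x ih =>
    rw [List.foldl_append, List.foldl_cons, List.foldl_nil, PySem.Set.ofList_append_singleton]
    have hkeys : (xs.foldl (fun d x => d.insert x (c x)) PySem.Dict.empty).keys
        = PySem.Set.ofList xs := by
      rw [PySem.Dict.keys_foldl_insert]
      simp [pysem]
    by_cases hm : x ∈ xs
    · have hmem : x ∈ PySem.Set.ofList xs := (PySem.Set.mem_ofList _ _).mpr hm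
      have hc : (xs.foldl (fun d x => d.insert x (c x)) PySem.Dict.empty).contains x = true := by
        rw [PySem.Dict.contains_iff_mem_keys, hkeys]; exact hmem
      rw [PySem.Dict.items_insert, if_pos hc, PySem.Set.add_of_mem hmem, ih, List.map_map]
      apply List.map_congr_left
      intro y _
      simp only [Function.comp]
      by_cases hyx : y = x
      · simp [hyx]
      · simp [hyx]
    · have hmem : x ∉ PySem.Set.ofList xs := fun hc => hm ((PySem.Set.mem_ofList _ _).mp hc)
      have hc : (xs.foldl (fun d x => d.insert x (c x)) PySem.Dict.empty).contains x = false := by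
        rw [Bool.eq_false_iff]
        intro h
        exact hmem (hkeys ▸ (PySem.Dict.contains_iff_mem_keys _ _).mp h)
      rw [PySem.Dict.items_insert, if_neg (by simp [hc]), PySem.Set.add_of_not_mem hmem, ih, List.map_append]
      rfl

-- ===== VERDICT (by name: the statement is the Claim_ definition above) =====
theorem count_atrasos_by_uf_and_transportadora_spec : Claim_equal_count_atrasos_by_uf_and_transportadora := by
  intro atrasos _ _
  unfold Spec_count_atrasos_by_uf_and_transportadora
  unfold count_atrasos_by_uf_and_transportadora count_atrasos_by_uf_and_transportadora_alt
  set ks : List (String × String) := atrasos.map pvKey with hks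
  have hA : atrasos.foldl (fun oc atraso =>
      let uf := (PySem.Dict.ofList atraso).getD "UF" ""
      let transportadora := (PySem.Dict.ofList atraso).getD "transportadora" ""
      oc.modify uf PySem.Dict.empty (fun inner => inner.modify transportadora 0 (· + 1)))
      PySem.Dict.empty = ks.foldl pvStepA PySem.Dict.empty := by
    rw [hks, List.foldl_map]; rfl
  have hKeysEq : atrasos.map (fun a => ((PySem.Dict.ofList a).getD "UF" "", (PySem.Dict.ofList a).getD "transportadora" "")) = ks := by
    rw [hks]; rfl
  simp only [hA, hKeysEq]
  set oc := ks.foldl pvStepA PySem.Dict.empty with hoc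
  set us := PySem.List.sorted (PySem.Set.ofList (ks.map (·.1))) (fun u => u) false with hus
  -- keys of oc
  have hk : oc.keys = PySem.Set.ofList (ks.map (·.1)) := by
    rw [hoc]
    refine Eq.trans (PySem.Dict.keys_foldl_modify_key ks (fun k => k.1) PySem.Dict.empty
      (fun o k => fun inner => inner.modify k.2 0 (· + 1)) PySem.Dict.empty) ?_
    simp [PySem.Set.update_nil_left]
  have hnd : oc.keys.Nodup := by
    rw [hk]; exact PySem.Set.nodup_ofList _
  -- sorting oc.items by fst = mapping over the sorted distinct UFs
  have hsorted : PySem.List.sorted oc.items (fun p => p.1) false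
      = us.map (fun u => (u, oc.getD u PySem.Dict.empty)) := by
    apply PySem.List.sorted_eq_of_perm_of_pairwise_lt
    · rw [PySem.Dict.items_eq_map_keys oc hnd PySem.Dict.empty, hk]
      apply List.Perm.map
      exact PySem.List.sorted_perm _ _ _
    · have hpw : us.Pairwise (· < ·) := PySem.List.sorted_ofList_pairwise_lt _
      exact List.Pairwise.map _ (fun a b h => h) hpw
  simp only [hsorted, List.map_map]
  apply List.map_congr_left
  intro u _
  simp only [Function.comp]
  congr 1
  -- per-UF inner dicts have equal items
  rw [pvGetD_foldA]
  rw [show (PySem.Dict.empty : PySem.Dict String (PySem.Dict String Int)).getD u PySem.Dict.empty = PySem.Dict.empty from rfl]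
  rw [← PySem.Dict.counter_eq_foldl, PySem.Dict.items_counter]
  -- B side: the filtered fold is a fold over pvTs u ks with value ks.count (u, ·)
  have hBfold : (ks.filter (fun p => p.1 == u)).foldl
      (fun d p => d.insert p.2 ((ks.count (p.1, p.2) : Int))) PySem.Dict.empty
      = (pvTs u ks).foldl (fun d t => d.insert t ((ks.count (u, t) : Int))) PySem.Dict.empty := by
    rw [pvTs, List.foldl_map]
    apply PySem.List.foldl_congr_mem
    intro d p hp
    have : p.1 = u := by simpa using (List.mem_filter.mp hp).2
    rw [this]
  rw [hBfold, pvItems_foldl_insert_const]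
  apply List.map_congr_left
  intro t _
  rw [pvCount_ts]
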